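-- pv_equiv track=rewrite | github.com/ByggL/ProblemeVoyage | main.py | listToTab
-- ===== SOURCE A (Python) =====
-- def listToTab(data: list, dimensions: int):
--     # transforme une liste en tableau d'adjacence (avec dimensions de la matrice)
--     X: int = 0
--     Tab = [[0 for i in range(dimensions)] for j in range(dimensions)]
--     for i in range(1,dimensions):
--         for j in range(i, dimensions):
--             Tab[i-1][j] = int(data[X])
--             Tab[j][i-1] = int(data[X])
--             X += 1
--     return Tab
-- ===== SOURCE B (Python) =====
-- def listToTab(data: list, dimensions: int):
--     # Build the matrix without mutation: precompute the start offset of each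
--     # upper-triangle row in the flat list, then fill every cell by a closed-form
--     # index lookup (diagonal stays 0).
--     n = dimensions
--     starts = []
--     s = 0
--     for r in range(n):
--         starts.append(s)
--         s += n - 1 - r
--     return [[0 if r == c else int(data[starts[min(r, c)] + abs(r - c) - 1])
--              for c in range(n)]
--             for r in range(n)]
-- ===== Notes on version B (the rewrite author's own statement) =====
-- stated objective: alternative
-- what changed: A fills the matrix by in-place double writes (upper and mirrored lower cell) in one fused nested loop over a running flat index; B is pure: it precomputes the flat start offset of each upper-triangle row once and then builds the whole matrix by a comprehension that looks each cell up by a closed-form index, leaving the diagonal 0.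
import Mathlib
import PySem

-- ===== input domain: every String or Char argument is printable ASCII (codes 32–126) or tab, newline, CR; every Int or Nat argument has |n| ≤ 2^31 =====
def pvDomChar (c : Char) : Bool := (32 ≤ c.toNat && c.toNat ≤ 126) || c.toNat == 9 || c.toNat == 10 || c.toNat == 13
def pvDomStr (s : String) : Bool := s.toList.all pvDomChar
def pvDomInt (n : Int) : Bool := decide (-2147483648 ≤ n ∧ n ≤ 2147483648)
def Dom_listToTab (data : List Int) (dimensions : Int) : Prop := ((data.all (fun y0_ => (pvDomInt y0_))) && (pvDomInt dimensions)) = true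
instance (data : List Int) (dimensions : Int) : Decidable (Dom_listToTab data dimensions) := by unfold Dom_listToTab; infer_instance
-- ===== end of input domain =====

-- B builds the symmetric matrix purely (precomputed row start offsets + closed-form lookup per cell)
-- instead of A's in-place double-write loops: an alternative decomposition, same O(n^2) cost.

-- ===== PORT A =====
-- Tab[r][c] = v (one Python item assignment); indices are nonnegative and in range wherever A executes it
def pvSet2 (t : List (List Int)) (r c : Int) (v : Int) : List (List Int) :=
  PySem.List.pySetD t r (PySem.List.pySetD (PySem.List.pyGetD t r []) c v)

def listToTab (data : List Int) (dimensions : Int) : List (List Int) :=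
  let Tab := (PySem.List.pyRange 0 dimensions 1).map
      (fun _j => (PySem.List.pyRange 0 dimensions 1).map (fun _i => (0 : Int)))
  let res := (PySem.List.pyRange 1 dimensions 1).foldl
      (fun (st : List (List Int) × Int) i =>
        (PySem.List.pyRange i dimensions 1).foldl
          (fun (st : List (List Int) × Int) j =>
            -- int(data[X]) on an int is the identity; IndexError excluded by Pre_
            let v := (PySem.List.pyGet? data st.2).getD 0
            (pvSet2 (pvSet2 st.1 (i - 1) j v) j (i - 1) v, st.2 + 1))
          st)
      (Tab, 0)
  res.1

-- ===== PORT B =====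
def listToTab_alt (data : List Int) (dimensions : Int) : List (List Int) :=
  let n := dimensions
  let st := (PySem.List.pyRange 0 n 1).foldl
      (fun (st : List Int × Int) r => (st.1 ++ [st.2], st.2 + (n - 1 - r))) ([], 0)
  let starts := st.1
  (PySem.List.pyRange 0 n 1).map fun r =>
    (PySem.List.pyRange 0 n 1).map fun c =>
      if r = c then 0
      else
        -- starts[min(r,c)] is always in range; data[...]: IndexError excluded by Pre_
        (PySem.List.pyGet? data
          (PySem.List.pyGetD starts (min r c) 0 + ((r - c).natAbs : Int) - 1)).getD 0

-- ===== PRECONDITION & SPEC =====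
-- Pre_ excludes exactly the inputs on which both Pythons raise IndexError: a flat list
-- shorter than the dimensions*(dimensions-1)/2 upper-triangle entries the matrix needs.
def Pre_listToTab (data : List Int) (dimensions : Int) : Prop :=
  dimensions ≤ 1 ∨ dimensions * (dimensions - 1) ≤ 2 * data.length
instance (data : List Int) (dimensions : Int) : Decidable (Pre_listToTab data dimensions) := by unfold Pre_listToTab; infer_instance
def pvWitness_listToTab : List Int × Int := ([1, 2, 3], 3)

def Spec_listToTab (data : List Int) (dimensions : Int) (out : List (List Int)) : Prop := out = listToTab_alt data dimensions
instance (data : List Int) (dimensions : Int) (out : List (List Int)) : Decidable (Spec_listToTab data dimensions out) := by unfold Spec_listToTab; infer_instance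

-- ===== CLAIM (what is proved, stated in full; the proofs are below) =====
def Claim_equal_listToTab : Prop := ∀ (data : List Int) (dimensions : Int), Dom_listToTab data dimensions → Pre_listToTab data dimensions → Spec_listToTab data dimensions (listToTab data dimensions)

-- ===== LEMMAS AND PROOFS =====

def pvS (n : Nat) : Nat → Nat
  | 0 => 0
  | r + 1 => pvS n r + (n - 1 - r)

def pvIdx (n r c : Nat) : Nat := pvS n r + (c - r - 1)

def pvEntry (data : List Int) (n r c : Nat) : Int :=
  (data[pvIdx n (min r c) (max r c)]?).getD 0

def pvMatP (data : List Int) (n k j0 : Nat) : List (List Int) :=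
  (List.range n).map fun r => (List.range n).map fun c =>
    if r ≠ c ∧ (min r c < k ∨ (min r c = k ∧ max r c < j0)) then pvEntry data n r c else 0

theorem pv_set_map_range {α : Type} (f : Nat → α) (n i : Nat) (v : α) :
    ((List.range n).map f).set i v = (List.range n).map (fun r => if r = i then v else f r) := by
  apply List.ext_getElem
  · simp
  · intro r h1 h2
    simp only [List.getElem_set, List.getElem_map, List.getElem_range]
    by_cases h : i = r <;> simp [h]
    omega

theorem pvEntry_symm (data : List Int) (n r c : Nat) :
    pvEntry data n r c = pvEntry data n c r := by
  simp [pvEntry, Nat.min_comm, Nat.max_comm]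

theorem pvSetStep (data : List Int) (n k j : Nat) (hk : k < j) (hj : j < n) :
    pvSet2 (pvSet2 (pvMatP data n k j) (k : Int) (j : Int) (pvEntry data n k j))
      (j : Int) (k : Int) (pvEntry data n k j) = pvMatP data n k (j + 1) := by
  set v := pvEntry data n k j with hv
  have hlen : ∀ m j0, (pvMatP data n m j0).length = n := by intro m j0; simp [pvMatP]
  unfold pvSet2
  simp only [PySem.List.pySetD_natCast, PySem.List.pyGetD_natCast]
  rw [pvMatP]
  rw [List.getD_eq_getElem _ _ (by simp; omega)]
  simp only [List.getElem_map, List.getElem_range]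
  rw [pv_set_map_range, pv_set_map_range]
  rw [List.getD_eq_getElem _ _ (by simp; omega)]
  simp only [List.getElem_map, List.getElem_range]
  rw [if_neg (by omega)]
  rw [pv_set_map_range, pv_set_map_range, pvMatP]
  apply List.map_congr_left
  intro r hr
  rw [List.mem_range] at hr
  by_cases hrj : r = j
  · subst hrj
    rw [if_pos rfl]
    apply List.map_congr_left
    intro c hc
    rw [List.mem_range] at hc
    by_cases hck : c = k
    · subst hck
      rw [if_pos rfl, if_pos (by omega)]
      rw [hv, pvEntry_symm]
    · rw [if_neg hck]
      exact if_congr (by constructor <;> intro h <;> exact ⟨h.1, by omega⟩) rfl rfl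
  · rw [if_neg hrj]
    by_cases hrk : r = k
    · subst hrk
      rw [if_pos rfl]
      apply List.map_congr_left
      intro c hc
      rw [List.mem_range] at hc
      by_cases hcj : c = j
      · subst hcj
        rw [if_pos rfl, if_pos (by omega)]
      · rw [if_neg hcj]
        exact if_congr (by constructor <;> intro h <;> exact ⟨h.1, by omega⟩) rfl rfl
    · rw [if_neg hrk]
      apply List.map_congr_left
      intro c hc
      rw [List.mem_range] at hc
      exact if_congr (by constructor <;> intro h <;> exact ⟨h.1, by omega⟩) rfl rfl

def pvInnerF (data : List Int) (i : Int) : (List (List Int) × Int) → Int → (List (List Int) × Int) :=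
  fun st j =>
    let v := (PySem.List.pyGet? data st.2).getD 0
    (pvSet2 (pvSet2 st.1 (i - 1) j v) j (i - 1) v, st.2 + 1)

theorem pvInner (data : List Int) (n k : Nat) (hk : k < n) :
    ∀ (m j0 : Nat), n - j0 = m → k + 1 ≤ j0 → j0 ≤ n →
    (PySem.List.pyRange (j0 : Int) (n : Int) 1).foldl (pvInnerF data ((k + 1 : Nat) : Int))
        (pvMatP data n k j0, (pvIdx n k j0 : Int))
      = (pvMatP data n k n, (pvS n (k + 1) : Int)) := by
  intro m
  induction m with
  | zero =>
    intro j0 hm h1 h2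
    have hj0 : j0 = n := by omega
    rw [hj0, PySem.List.pyRange_one_eq_nil (le_refl _), List.foldl_nil]
    have : pvIdx n k n = pvS n (k + 1) := by simp [pvIdx, pvS]; omega
    rw [this]
  | succ m ih =>
    intro j0 hm h1 h2
    have hj0n : j0 < n := by omega
    rw [PySem.List.pyRange_one_cons (by exact_mod_cast hj0n), List.foldl_cons]
    have hstep : pvInnerF data ((k + 1 : Nat) : Int) (pvMatP data n k j0, (pvIdx n k j0 : Int)) ((j0 : Int))
        = (pvMatP data n k (j0 + 1), (pvIdx n k (j0 + 1) : Int)) := by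
      show (pvSet2 (pvSet2 (pvMatP data n k j0) (((k + 1 : Nat) : Int) - 1) (j0 : Int) _) (j0 : Int) (((k + 1 : Nat) : Int) - 1) _,
            ((pvIdx n k j0 : Int) + 1)) = _
      have hi : (((k + 1 : Nat) : Int) - 1) = (k : Int) := by push_cast; ring
      rw [hi]
      have hv : (PySem.List.pyGet? data ((pvIdx n k j0 : Nat) : Int)).getD 0 = pvEntry data n k j0 := by
        rw [PySem.List.pyGet?_natCast]
        have h1 : min k j0 = k := by omega
        have h2 : max k j0 = j0 := by omega
        simp [pvEntry, h1, h2]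
      rw [hv, pvSetStep data n k j0 (by omega) hj0n]
      have : (pvIdx n k j0 : Int) + 1 = ((pvIdx n k (j0 + 1) : Nat) : Int) := by
        have : pvIdx n k j0 + 1 = pvIdx n k (j0 + 1) := by simp [pvIdx]; omega
        push_cast [← this]; ring
      rw [this]
    rw [hstep]
    have : ((j0 : Int) + 1) = ((j0 + 1 : Nat) : Int) := by push_cast; ring
    rw [this]
    exact ih (j0 + 1) (by omega) (by omega) (by omega)

theorem pvMatP_done (data : List Int) (n k : Nat) (_hk : k < n) :
    pvMatP data n k n = pvMatP data n (k + 1) (k + 2) := by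
  rw [pvMatP, pvMatP]
  apply List.map_congr_left
  intro r hr
  rw [List.mem_range] at hr
  apply List.map_congr_left
  intro c hc
  rw [List.mem_range] at hc
  exact if_congr (by constructor <;> intro h <;> exact ⟨h.1, by omega⟩) rfl rfl

theorem pvOuter (data : List Int) (n : Nat) :
    ∀ (m k : Nat), n - k = m → k ≤ n →
    (PySem.List.pyRange ((k : Int) + 1) (n : Int) 1).foldl
        (fun st i => (PySem.List.pyRange i (n : Int) 1).foldl (pvInnerF data i) st)
        (pvMatP data n k (k + 1), (pvS n k : Int))
      = (pvMatP data n n (n + 1), (pvS n n : Int)) := by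
  intro m
  induction m with
  | zero =>
    intro k hm hkn
    have hkn' : k = n := by omega
    rw [hkn', PySem.List.pyRange_one_eq_nil (by omega), List.foldl_nil]
  | succ m ih =>
    intro k hm hkn
    have hklt : k < n := by omega
    by_cases hlast : k + 1 = n
    · rw [PySem.List.pyRange_one_eq_nil (by omega), List.foldl_nil]
      have e1 : pvMatP data n k (k + 1) = pvMatP data n n (n + 1) := by
        rw [pvMatP, pvMatP]
        apply List.map_congr_left
        intro r hr
        rw [List.mem_range] at hr
        apply List.map_congr_left
        intro c hc
        rw [List.mem_range] at hc
        exact if_congr (by constructor <;> intro hx <;> exact ⟨hx.1, by omega⟩) rfl rfl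
      have e2 : pvS n n = pvS n k := by
        rw [← hlast]
        simp [pvS]
      rw [e1, e2]
    · have hlt : k + 1 < n := by omega
      rw [PySem.List.pyRange_one_cons (show (k : Int) + 1 < (n : Int) by omega), List.foldl_cons]
      have hcast : ((k : Int) + 1) = ((k + 1 : Nat) : Int) := by push_cast; ring
      have hidx : (pvS n k : Int) = ((pvIdx n k (k + 1) : Nat) : Int) := by
        have : pvIdx n k (k + 1) = pvS n k := by simp [pvIdx]
        rw [this]
      rw [hidx, hcast]
      rw [pvInner data n k hklt (n - (k + 1)) (k + 1) rfl (by omega) (by omega)]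
      rw [pvMatP_done data n k hklt]
      exact ih (k + 1) (by omega) (by omega)

theorem pvStartsFold (n : Nat) :
    ∀ (m : Nat), m ≤ n →
    (PySem.List.pyRange 0 (m : Int) 1).foldl
        (fun (st : List Int × Int) r => (st.1 ++ [st.2], st.2 + ((n : Int) - 1 - r))) ([], 0)
      = ((List.range m).map (fun r => (pvS n r : Int)), (pvS n m : Int)) := by
  intro m
  induction m with
  | zero =>
    intro _
    rw [show ((0 : Nat) : Int) = 0 by rfl, PySem.List.pyRange_one_eq_nil (le_refl _), List.foldl_nil]
    simp [pvS]
  | succ m ih =>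
    intro h
    rw [show ((m + 1 : Nat) : Int) = (m : Int) + 1 by push_cast; ring,
      PySem.List.pyRange_one_succ_right (by positivity), List.foldl_append, ih (by omega),
      List.foldl_cons, List.foldl_nil]
    congr 1
    · simp [List.range_succ]
    · have : pvS n (m + 1) = pvS n m + (n - 1 - m) := by simp [pvS]
      rw [this]
      push_cast
      omega


theorem pvTab0 (data : List Int) (n : Nat) :
    (PySem.List.pyRange 0 (n : Int) 1).map
        (fun _j => (PySem.List.pyRange 0 (n : Int) 1).map (fun _i => (0 : Int)))
      = pvMatP data n 0 1 := by
  rw [PySem.List.pyRange_zero_nat, pvMatP, List.map_map]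
  apply List.map_congr_left
  intro r hr
  rw [List.mem_range] at hr
  show (List.map (fun k : Nat => (k : Int)) (List.range n)).map (fun _i => (0 : Int)) = _
  rw [List.map_map]
  apply List.map_congr_left
  intro c hc
  rw [List.mem_range] at hc
  show (0 : Int) = _
  rw [if_neg (by omega)]

theorem pvA (data : List Int) (n : Nat) :
    listToTab data (n : Int) = pvMatP data n n (n + 1) := by
  show ((PySem.List.pyRange 1 (n : Int) 1).foldl
      (fun st i => (PySem.List.pyRange i (n : Int) 1).foldl (pvInnerF data i) st)
      ((PySem.List.pyRange 0 (n : Int) 1).map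
        (fun _j => (PySem.List.pyRange 0 (n : Int) 1).map (fun _i => (0 : Int))), 0)).1
    = pvMatP data n n (n + 1)
  rw [pvTab0 data n]
  have h := pvOuter data n n 0 (by omega) (by omega)
  norm_num [pvS] at h
  rw [h]

theorem pvB (data : List Int) (n : Nat) :
    listToTab_alt data (n : Int) = pvMatP data n n (n + 1) := by
  simp only [listToTab_alt]
  rw [pvStartsFold n n (le_refl n)]
  rw [PySem.List.pyRange_zero_nat, pvMatP, List.map_map]
  apply List.map_congr_left
  intro r hr
  rw [List.mem_range] at hr
  simp only [Function.comp_apply]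
  rw [List.map_map]
  apply List.map_congr_left
  intro c hc
  rw [List.mem_range] at hc
  simp only [Function.comp_apply]
  by_cases hrc : r = c
  · rw [if_pos (by exact_mod_cast hrc), if_neg (by omega)]
  · rw [if_neg (by exact_mod_cast hrc), if_pos ⟨hrc, by omega⟩]
    rw [← Nat.cast_min, PySem.List.pyGetD_natCast,
      List.getD_eq_getElem _ _ (by simp; omega), List.getElem_map, List.getElem_range]
    have hidx : ((pvS n (min r c) : Nat) : Int) + ((((r : Int) - (c : Int)).natAbs : Nat) : Int) - 1
        = ((pvIdx n (min r c) (max r c) : Nat) : Int) := by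
      have h1 : ((r : Int) - (c : Int)).natAbs = max r c - min r c := by omega
      have h2 : pvIdx n (min r c) (max r c) = pvS n (min r c) + (max r c - min r c - 1) := by
        simp [pvIdx]
      rw [h1, h2]
      omega
    rw [hidx, PySem.List.pyGet?_natCast]
    rfl

theorem pvMain (data : List Int) (dimensions : Int) :
    listToTab data dimensions = listToTab_alt data dimensions := by
  by_cases hd : 0 ≤ dimensions
  · rw [show dimensions = ((dimensions.toNat : Nat) : Int) from (Int.toNat_of_nonneg hd).symm,
      pvA, pvB]
  · have h0 : PySem.List.pyRange 0 dimensions 1 = [] := PySem.List.pyRange_one_eq_nil (by omega)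
    have h1 : PySem.List.pyRange 1 dimensions 1 = [] := PySem.List.pyRange_one_eq_nil (by omega)
    simp [listToTab, listToTab_alt, h0, h1]

-- ===== VERDICT (by name: the statement is the Claim_ definition above) =====
theorem listToTab_spec : Claim_equal_listToTab := by
  intro data dimensions _ _
  unfold Spec_listToTab
  exact pvMain data dimensions
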